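-- pv_equiv track=rewrite | github.com/rcook0/DP | dp_compendium/affine_gap_alignment.py | needleman_wunsch_affine
-- ===== SOURCE A (Python) =====
-- def needleman_wunsch_affine(a, b, match=1, mismatch=-1, gap_open=-2, gap_extend=-1):
--     n,m=len(a),len(b)
--     NEG=-10**9
--     M=[[NEG]*(m+1) for _ in range(n+1)]
--     Ix=[[NEG]*(m+1) for _ in range(n+1)]
--     Iy=[[NEG]*(m+1) for _ in range(n+1)]
--     M[0][0]=0
--     for i in range(1,n+1):
--         Ix[i][0]=gap_open + (i-1)*gap_extend
--     for j in range(1,m+1):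
--         Iy[0][j]=gap_open + (j-1)*gap_extend
--     for i in range(1,n+1):
--         for j in range(1,m+1):
--             sc = match if a[i-1]==b[j-1] else mismatch
--             M[i][j]=max(M[i-1][j-1], Ix[i-1][j-1], Iy[i-1][j-1]) + sc
--             Ix[i][j]=max(M[i-1][j]+gap_open, Ix[i-1][j]+gap_extend)
--             Iy[i][j]=max(M[i][j-1]+gap_open, Iy[i][j-1]+gap_extend)
--     return max(M[n][m], Ix[n][m], Iy[n][m])
-- ===== SOURCE B (Python) =====
-- def needleman_wunsch_affine(a, b, match=1, mismatch=-1, gap_open=-2, gap_extend=-1):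
--     # Top-down memoized evaluation of the three-state affine-gap recurrence,
--     # driven by an explicit work stack (avoids Python's recursion limit).
--     NEG = -10**9
--     memo = {}
--     stack = [(len(a), len(b))]
--     while stack:
--         key = stack.pop()
--         if key in memo:
--             continue
--         i, j = key
--         if i == 0 and j == 0:
--             memo[key] = (0, NEG, NEG)
--         elif j == 0:
--             memo[key] = (NEG, gap_open + (i - 1) * gap_extend, NEG)
--         elif i == 0:
--             memo[key] = (NEG, NEG, gap_open + (j - 1) * gap_extend)
--         else:
--             kd = (i - 1, j - 1); ku = (i - 1, j); kl = (i, j - 1)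
--             d = memo.get(kd); u = memo.get(ku); l = memo.get(kl)
--             if d is None or u is None or l is None:
--                 stack.append(key)
--                 if d is None: stack.append(kd)
--                 if u is None: stack.append(ku)
--                 if l is None: stack.append(kl)
--                 continue
--             sc = match if a[i - 1] == b[j - 1] else mismatch
--             memo[key] = (max(d[0], d[1], d[2]) + sc,
--                          max(u[0] + gap_open, u[1] + gap_extend),
--                          max(l[0] + gap_open, l[2] + gap_extend))
--     M, Ix, Iy = memo[(len(a), len(b))]
--     return max(M, Ix, Iy)
-- ===== Notes on version B (the rewrite author's own statement) =====
-- stated objective: alternative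
-- what changed: A fills three (n+1)x(m+1) bottom-up DP tables row by row; B evaluates the same three-state affine-gap recurrence top-down with a memo dict keyed on (i,j), driven by an explicit work stack (demand-driven memoized recursion instead of grid fill).
import Mathlib
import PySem

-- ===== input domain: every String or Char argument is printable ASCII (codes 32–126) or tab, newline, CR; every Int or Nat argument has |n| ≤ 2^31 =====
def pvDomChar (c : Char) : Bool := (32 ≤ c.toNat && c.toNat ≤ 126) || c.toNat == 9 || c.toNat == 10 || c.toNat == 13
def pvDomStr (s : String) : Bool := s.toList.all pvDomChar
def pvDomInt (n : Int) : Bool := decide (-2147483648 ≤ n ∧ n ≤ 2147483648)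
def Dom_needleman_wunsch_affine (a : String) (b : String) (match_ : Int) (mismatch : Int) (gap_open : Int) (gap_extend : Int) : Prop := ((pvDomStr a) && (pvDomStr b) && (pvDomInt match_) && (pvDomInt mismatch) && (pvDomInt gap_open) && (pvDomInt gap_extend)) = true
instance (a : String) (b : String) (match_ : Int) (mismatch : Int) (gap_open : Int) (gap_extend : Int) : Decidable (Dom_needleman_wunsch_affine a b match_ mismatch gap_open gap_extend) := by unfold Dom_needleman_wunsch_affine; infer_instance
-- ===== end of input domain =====

-- B replaces A's bottom-up fill of three (n+1)×(m+1) score tables by top-down memoized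
-- evaluation of the same three-state recurrence (objective: alternative decomposition;
-- B's Python drives the recursion with an explicit stack so no recursion-depth limit is hit).

-- ===== PORT A =====
-- t[i][j] read; every read A performs is in range, so the defaults are never used
def pvGet2 (t : List (List Int)) (i j : Int) : Int :=
  PySem.List.pyGetD (PySem.List.pyGetD t i []) j 0
-- t[i][j] = v; every write A performs is in range (Python would raise otherwise)
def pvSet2 (t : List (List Int)) (i j : Int) (v : Int) : List (List Int) :=
  PySem.List.pySetD t i (PySem.List.pySetD (PySem.List.pyGetD t i []) j v)

-- the body of A's inner 'for j' loop (named so the proofs can speak about it)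
def pvInnerA (a : String) (b : String) (match_ : Int) (mismatch : Int) (gap_open : Int) (gap_extend : Int) (i : Int)
    (st : List (List Int) × List (List Int) × List (List Int)) (j : Int) :
    List (List Int) × List (List Int) × List (List Int) :=
  let M := st.1
  let Ix := st.2.1
  let Iy := st.2.2
  let sc : Int := if PySem.Str.pyGet? a (i - 1) == PySem.Str.pyGet? b (j - 1) then match_ else mismatch
  let M := pvSet2 M i j (max (max (pvGet2 M (i-1) (j-1)) (pvGet2 Ix (i-1) (j-1))) (pvGet2 Iy (i-1) (j-1)) + sc)
  let Ix := pvSet2 Ix i j (max (pvGet2 M (i-1) j + gap_open) (pvGet2 Ix (i-1) j + gap_extend))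
  let Iy := pvSet2 Iy i j (max (pvGet2 M i (j-1) + gap_open) (pvGet2 Iy i (j-1) + gap_extend))
  (M, Ix, Iy)

-- the body of A's outer 'for i' loop
def pvOuterA (a : String) (b : String) (match_ : Int) (mismatch : Int) (gap_open : Int) (gap_extend : Int)
    (st : List (List Int) × List (List Int) × List (List Int)) (i : Int) :
    List (List Int) × List (List Int) × List (List Int) :=
  (PySem.List.pyRange 1 (PySem.Str.len b + 1) 1).foldl
    (pvInnerA a b match_ mismatch gap_open gap_extend i) st

def needleman_wunsch_affine (a : String) (b : String) (match_ : Int) (mismatch : Int) (gap_open : Int) (gap_extend : Int) : Int :=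
  let n := PySem.Str.len a
  let m := PySem.Str.len b
  let NEG : Int := -(10^9)
  let M := (PySem.List.pyRange 0 (n+1) 1).map (fun _ => PySem.List.pyRepeat [NEG] (m+1))
  let Ix := (PySem.List.pyRange 0 (n+1) 1).map (fun _ => PySem.List.pyRepeat [NEG] (m+1))
  let Iy := (PySem.List.pyRange 0 (n+1) 1).map (fun _ => PySem.List.pyRepeat [NEG] (m+1))
  let M := pvSet2 M 0 0 0
  let Ix := (PySem.List.pyRange 1 (n+1) 1).foldl
    (fun Ix i => pvSet2 Ix i 0 (gap_open + (i-1) * gap_extend)) Ix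
  let Iy := (PySem.List.pyRange 1 (m+1) 1).foldl
    (fun Iy j => pvSet2 Iy 0 j (gap_open + (j-1) * gap_extend)) Iy
  let st := (PySem.List.pyRange 1 (n+1) 1).foldl
    (pvOuterA a b match_ mismatch gap_open gap_extend) (M, Ix, Iy)
  max (max (pvGet2 st.1 n m) (pvGet2 st.2.1 n m)) (pvGet2 st.2.2 n m)

-- ===== PORT B =====
-- Source B's memoized top-down evaluation of (M,Ix,Iy) at a state (i,j): Source B drives this
-- same recurrence with an explicit work stack (only to evade Python's recursion-depth
-- limit); the port writes the memoized recursion directly, threading the same memo dict.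
def nwaGo (al bl : List Char) (match_ : Int) (mismatch : Int) (gap_open : Int) (gap_extend : Int)
    (i j : Nat) (memo : PySem.Dict (Nat × Nat) (Int × Int × Int)) :
    (Int × Int × Int) × PySem.Dict (Nat × Nat) (Int × Int × Int) :=
  match memo.get? (i, j) with
  | some v => (v, memo)
  | none =>
    let r : (Int × Int × Int) × PySem.Dict (Nat × Nat) (Int × Int × Int) :=
      match i, j with
      | 0, 0 => ((0, -(10^9), -(10^9)), memo)
      | i' + 1, 0 => ((-(10^9), gap_open + (i' : Int) * gap_extend, -(10^9)), memo)
      | 0, j' + 1 => ((-(10^9), -(10^9), gap_open + (j' : Int) * gap_extend), memo)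
      | i' + 1, j' + 1 =>
        let d := nwaGo al bl match_ mismatch gap_open gap_extend i' j' memo
        let u := nwaGo al bl match_ mismatch gap_open gap_extend i' (j' + 1) d.2
        let l := nwaGo al bl match_ mismatch gap_open gap_extend (i' + 1) j' u.2
        let sc : Int := if al[i']? == bl[j']? then match_ else mismatch
        ((max (max d.1.1 d.1.2.1) d.1.2.2 + sc,
          max (u.1.1 + gap_open) (u.1.2.1 + gap_extend),
          max (l.1.1 + gap_open) (l.1.2.2 + gap_extend)), l.2)
    (r.1, r.2.insert (i, j) r.1)
termination_by i + j

def needleman_wunsch_affine_alt (a : String) (b : String) (match_ : Int) (mismatch : Int) (gap_open : Int) (gap_extend : Int) : Int :=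
  let r := nwaGo a.toList b.toList match_ mismatch gap_open gap_extend
    a.toList.length b.toList.length PySem.Dict.empty
  max (max r.1.1 r.1.2.1) r.1.2.2

-- ===== PRECONDITION & SPEC =====
def Spec_needleman_wunsch_affine (a : String) (b : String) (match_ : Int) (mismatch : Int) (gap_open : Int) (gap_extend : Int) (out : Int) : Prop := out = needleman_wunsch_affine_alt a b match_ mismatch gap_open gap_extend
instance (a : String) (b : String) (match_ : Int) (mismatch : Int) (gap_open : Int) (gap_extend : Int) (out : Int) : Decidable (Spec_needleman_wunsch_affine a b match_ mismatch gap_open gap_extend out) := by unfold Spec_needleman_wunsch_affine; infer_instance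

-- ===== CLAIM (what is proved, stated in full; the proofs are below) =====
def Claim_equal_needleman_wunsch_affine : Prop := ∀ (a : String) (b : String) (match_ : Int) (mismatch : Int) (gap_open : Int) (gap_extend : Int), Dom_needleman_wunsch_affine a b match_ mismatch gap_open gap_extend → Spec_needleman_wunsch_affine a b match_ mismatch gap_open gap_extend (needleman_wunsch_affine a b match_ mismatch gap_open gap_extend)

-- ===== LEMMAS AND PROOFS =====

-- the pure three-state recurrence both programs compute (proof-side value function)
def nwaF (al bl : List Char) (match_ : Int) (mismatch : Int) (gap_open : Int) (gap_extend : Int) :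
    Nat → Nat → Int × Int × Int
  | 0, 0 => (0, -(10^9), -(10^9))
  | i' + 1, 0 => (-(10^9), gap_open + (i' : Int) * gap_extend, -(10^9))
  | 0, j' + 1 => (-(10^9), -(10^9), gap_open + (j' : Int) * gap_extend)
  | i' + 1, j' + 1 =>
    let d := nwaF al bl match_ mismatch gap_open gap_extend i' j'
    let u := nwaF al bl match_ mismatch gap_open gap_extend i' (j' + 1)
    let l := nwaF al bl match_ mismatch gap_open gap_extend (i' + 1) j'
    let sc : Int := if al[i']? == bl[j']? then match_ else mismatch
    (max (max d.1 d.2.1) d.2.2 + sc,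
     max (u.1 + gap_open) (u.2.1 + gap_extend),
     max (l.1 + gap_open) (l.2.2 + gap_extend))
termination_by i j => i + j

-- B side: a memo is sound when every stored entry is the recurrence's value
def nwaMemoOk (al bl : List Char) (match_ mismatch gap_open gap_extend : Int)
    (memo : PySem.Dict (Nat × Nat) (Int × Int × Int)) : Prop :=
  ∀ k v, memo.get? k = some v → v = nwaF al bl match_ mismatch gap_open gap_extend k.1 k.2

theorem nwaMemoOk_insert (al bl : List Char) (match_ mismatch gap_open gap_extend : Int)
    (memo : PySem.Dict (Nat × Nat) (Int × Int × Int)) (i j : Nat) (v : Int × Int × Int)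
    (hm : nwaMemoOk al bl match_ mismatch gap_open gap_extend memo)
    (hv : v = nwaF al bl match_ mismatch gap_open gap_extend i j) :
    nwaMemoOk al bl match_ mismatch gap_open gap_extend (memo.insert (i, j) v) := by
  intro k w hk
  rw [PySem.Dict.get?_insert] at hk
  split at hk
  · next heq =>
    subst heq
    cases hk
    simpa using hv
  · exact hm k w hk

theorem nwaGo_spec (al bl : List Char) (match_ mismatch gap_open gap_extend : Int) :
    ∀ N i j, i + j ≤ N → ∀ memo, nwaMemoOk al bl match_ mismatch gap_open gap_extend memo →
      (nwaGo al bl match_ mismatch gap_open gap_extend i j memo).1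
        = nwaF al bl match_ mismatch gap_open gap_extend i j
      ∧ nwaMemoOk al bl match_ mismatch gap_open gap_extend
          (nwaGo al bl match_ mismatch gap_open gap_extend i j memo).2 := by
  intro N
  induction N with
  | zero =>
    intro i j h memo hm
    have hi : i = 0 := by omega
    have hj : j = 0 := by omega
    subst hi; subst hj
    rw [nwaGo.eq_def]
    cases hget : memo.get? (0, 0) with
    | some v =>
      refine ⟨?_, ?_⟩ <;> simp
      · exact hm _ v hget
      · exact hm
    | none =>
      refine ⟨?_, ?_⟩ <;> simp
      · simp [nwaF]
      · exact nwaMemoOk_insert _ _ _ _ _ _ _ _ _ _ hm (by simp [nwaF])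
  | succ N ih =>
    intro i j h memo hm
    rw [nwaGo.eq_def]
    cases hget : memo.get? (i, j) with
    | some v =>
      refine ⟨?_, ?_⟩ <;> simp
      · exact hm _ v hget
      · exact hm
    | none =>
      match i, j with
      | 0, 0 =>
        refine ⟨?_, ?_⟩ <;> simp
        · simp [nwaF]
        · exact nwaMemoOk_insert _ _ _ _ _ _ _ _ _ _ hm (by simp [nwaF])
      | i' + 1, 0 =>
        refine ⟨?_, ?_⟩ <;> simp
        · simp [nwaF]
        · exact nwaMemoOk_insert _ _ _ _ _ _ _ _ _ _ hm (by simp [nwaF])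
      | 0, j' + 1 =>
        refine ⟨?_, ?_⟩ <;> simp
        · simp [nwaF]
        · exact nwaMemoOk_insert _ _ _ _ _ _ _ _ _ _ hm (by simp [nwaF])
      | i' + 1, j' + 1 =>
        have h1 := ih i' j' (by omega) memo hm
        have h2 := ih i' (j' + 1) (by omega) _ h1.2
        have h3 := ih (i' + 1) j' (by omega) _ h2.2
        have hval : (max (max (nwaGo al bl match_ mismatch gap_open gap_extend i' j' memo).1.1
              (nwaGo al bl match_ mismatch gap_open gap_extend i' j' memo).1.2.1)
              (nwaGo al bl match_ mismatch gap_open gap_extend i' j' memo).1.2.2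
              + (if al[i']? == bl[j']? then match_ else mismatch),
            max ((nwaGo al bl match_ mismatch gap_open gap_extend i' (j' + 1)
                (nwaGo al bl match_ mismatch gap_open gap_extend i' j' memo).2).1.1 + gap_open)
              ((nwaGo al bl match_ mismatch gap_open gap_extend i' (j' + 1)
                (nwaGo al bl match_ mismatch gap_open gap_extend i' j' memo).2).1.2.1 + gap_extend),
            max ((nwaGo al bl match_ mismatch gap_open gap_extend (i' + 1) j'
                (nwaGo al bl match_ mismatch gap_open gap_extend i' (j' + 1)
                  (nwaGo al bl match_ mismatch gap_open gap_extend i' j' memo).2).2).1.1 + gap_open)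
              ((nwaGo al bl match_ mismatch gap_open gap_extend (i' + 1) j'
                (nwaGo al bl match_ mismatch gap_open gap_extend i' (j' + 1)
                  (nwaGo al bl match_ mismatch gap_open gap_extend i' j' memo).2).2).1.2.2 + gap_extend))
            = nwaF al bl match_ mismatch gap_open gap_extend (i' + 1) (j' + 1) := by
          rw [h1.1, h2.1, h3.1, nwaF]
        refine ⟨?_, ?_⟩ <;> simp only
        · simpa using hval
        · simpa using nwaMemoOk_insert _ _ _ _ _ _ _ (i' + 1) (j' + 1) _ h3.2 hval

-- A side: Nat-indexed table access (pvGet2/pvSet2 at nonnegative in-range indices)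
def pvG (t : List (List Int)) (p q : Nat) : Int := (t.getD p []).getD q 0
def pvS (t : List (List Int)) (p q : Nat) (v : Int) : List (List Int) :=
  t.set p ((t.getD p []).set q v)

theorem pvGet2_natCast (t : List (List Int)) (p q : Nat) :
    pvGet2 t (p : Int) (q : Int) = pvG t p q := by
  simp [pvGet2, pvG, PySem.List.pyGetD_natCast]

theorem pvSet2_natCast (t : List (List Int)) (p q : Nat) (v : Int) :
    pvSet2 t (p : Int) (q : Int) v = pvS t p q v := by
  simp [pvSet2, pvS, PySem.List.pySetD_natCast, PySem.List.pyGetD_natCast]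

-- interior cells already filled when the outer loop has finished rows 1..I and,
-- inside row I+1, columns 1..J (boundary cells are filled from the start)
def pvDone (I J p q : Nat) : Bool := p == 0 || q == 0 || decide (p ≤ I) || (p == I + 1 && decide (q ≤ J))

-- what one of A's tables holds at that moment: the recurrence value on filled
-- cells (boundary values coincide with the recurrence), the NEG sentinel elsewhere
def pvDims (n m : Nat) (t : List (List Int)) : Prop :=
  t.length = n + 1 ∧ ∀ p, p ≤ n → (t.getD p []).length = m + 1

def pvTbl (F : Nat → Nat → Int × Int × Int) (sel : Int × Int × Int → Int)
    (n m I J : Nat) (t : List (List Int)) : Prop :=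
  pvDims n m t ∧
  ∀ p q, p ≤ n → q ≤ m →
    pvG t p q = if pvDone I J p q then sel (F p q) else -(10^9)

def pvInv (al bl : List Char) (match_ mismatch gap_open gap_extend : Int) (I J : Nat)
    (st : List (List Int) × List (List Int) × List (List Int)) : Prop :=
  pvTbl (nwaF al bl match_ mismatch gap_open gap_extend) (·.1) al.length bl.length I J st.1 ∧
  pvTbl (nwaF al bl match_ mismatch gap_open gap_extend) (·.2.1) al.length bl.length I J st.2.1 ∧
  pvTbl (nwaF al bl match_ mismatch gap_open gap_extend) (·.2.2) al.length bl.length I J st.2.2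


theorem pvRow_pvS (t : List (List Int)) (p q : Nat) (v : Int) (p' : Nat) (hp : p < t.length) :
    (pvS t p q v).getD p' [] = if p' = p then (t.getD p []).set q v else t.getD p' [] := by
  unfold pvS
  by_cases hpp : p' = p
  · subst hpp
    simp [List.getD_eq_getElem?_getD, hp]
  · simp [List.getD_eq_getElem?_getD, List.getElem?_set_ne (by omega : p ≠ p'), hpp]

theorem pvG_pvS (t : List (List Int)) (p q : Nat) (v : Int) (p' q' : Nat)
    (hp : p < t.length) (hq : q < (t.getD p []).length) :
    pvG (pvS t p q v) p' q' = if p' = p ∧ q' = q then v else pvG t p' q' := by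
  unfold pvG
  rw [pvRow_pvS t p q v p' hp]
  by_cases hpp : p' = p
  · subst hpp
    by_cases hqq : q' = q
    · subst hqq
      rw [List.getD_eq_getElem?_getD] at hq
      simp [List.getD_eq_getElem?_getD, hq]
    · simp [List.getD_eq_getElem?_getD, List.getElem?_set_ne (by omega : q ≠ q'), hqq]
  · simp [hpp]


theorem pvDims_replicate (n m : Nat) (c : Int) :
    pvDims n m (List.replicate (n+1) (List.replicate (m+1) c)) := by
  refine ⟨by simp, fun p hp => ?_⟩
  rw [List.getD_eq_getElem?_getD, List.getElem?_replicate]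
  simp [Nat.lt_succ_of_le hp]

theorem pvDims_pvS (n m : Nat) (t : List (List Int)) (p q : Nat) (v : Int)
    (h : pvDims n m t) (hp : p ≤ n) :
    pvDims n m (pvS t p q v) := by
  obtain ⟨hl, hr⟩ := h
  refine ⟨by simp [pvS, hl], fun p' hp' => ?_⟩
  rw [pvRow_pvS t p q v p' (by omega)]
  have hrp := hr p hp
  rw [List.getD_eq_getElem?_getD] at hrp
  split_ifs with hE
  · simpa using hrp
  · exact hr p' hp'

theorem pvG_replicate (n m : Nat) (c : Int) (p q : Nat) (hp : p ≤ n) (hq : q ≤ m) :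
    pvG (List.replicate (n+1) (List.replicate (m+1) c)) p q = c := by
  unfold pvG
  have h1 : (List.replicate (n+1) (List.replicate (m+1) c)).getD p [] = List.replicate (m+1) c := by
    rw [List.getD_eq_getElem?_getD, List.getElem?_replicate]
    simp [Nat.lt_succ_of_le hp]
  rw [h1, List.getD_eq_getElem?_getD, List.getElem?_replicate]
  simp [Nat.lt_succ_of_le hq]

theorem pvInitTbl (n m : Nat) :
    (PySem.List.pyRange 0 ((n:Int)+1) 1).map (fun _ => PySem.List.pyRepeat [(-(10^9):Int)] ((m:Int)+1))
      = List.replicate (n+1) (List.replicate (m+1) (-(10^9))) := by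
  rw [PySem.List.pyRepeat_singleton]
  have hm : ((m:Int)+1).toNat = m + 1 := by omega
  rw [hm, List.map_const', PySem.List.length_pyRange_one]
  congr 1

theorem pvTbl_M_init (al bl : List Char) (mt ms go ge : Int) (n m : Nat) :
    pvTbl (nwaF al bl mt ms go ge) (·.1) n m 0 0
      (pvS (List.replicate (n+1) (List.replicate (m+1) (-(10^9)))) 0 0 0) := by
  have hd := pvDims_replicate n m (-(10^9) : Int)
  refine ⟨pvDims_pvS n m _ 0 0 0 hd (by omega), fun p q hp hq => ?_⟩
  rw [pvG_pvS _ _ _ _ _ _ (by simp) (by have := hd.2 0 (by omega); omega)]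
  rcases p with _ | p' <;> rcases q with _ | q' <;>
    simp [pvDone, nwaF, pvG_replicate n m _ _ _ hp hq]

theorem pvIx_init (go ge : Int) (n m : Nat) (K : Nat) (hK : K ≤ n) :
    pvDims n m ((PySem.List.pyRange 1 ((K:Int)+1) 1).foldl
        (fun Ix i => pvSet2 Ix i 0 (go + (i-1) * ge))
        (List.replicate (n+1) (List.replicate (m+1) (-(10^9))))) ∧
    ∀ p q, p ≤ n → q ≤ m →
      pvG ((PySem.List.pyRange 1 ((K:Int)+1) 1).foldl
        (fun Ix i => pvSet2 Ix i 0 (go + (i-1) * ge))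
        (List.replicate (n+1) (List.replicate (m+1) (-(10^9))))) p q
      = if 1 ≤ p ∧ p ≤ K ∧ q = 0 then go + ((p:Int)-1) * ge else -(10^9) := by
  induction K with
  | zero =>
    rw [PySem.List.pyRange_one_eq_nil (by norm_num)]
    refine ⟨pvDims_replicate n m _, fun p q hp hq => ?_⟩
    simp only [List.foldl_nil]
    rw [pvG_replicate n m _ p q hp hq, if_neg (by omega)]
  | succ K ih =>
    have ih := ih (by omega)
    have hcast : (((K+1 : Nat)):Int) + 1 = (((K:Nat)):Int) + 1 + 1 := by push_cast; ring
    rw [hcast, PySem.List.pyRange_one_succ_right (by omega), List.foldl_append]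
    simp only [List.foldl_cons, List.foldl_nil]
    have hset : pvSet2 ((PySem.List.pyRange 1 ((K:Int)+1) 1).foldl
        (fun Ix i => pvSet2 Ix i 0 (go + (i-1) * ge))
        (List.replicate (n+1) (List.replicate (m+1) (-(10^9))))) ((K:Int)+1) 0
          (go + ((K:Int)+1-1) * ge)
        = pvS ((PySem.List.pyRange 1 ((K:Int)+1) 1).foldl
        (fun Ix i => pvSet2 Ix i 0 (go + (i-1) * ge))
        (List.replicate (n+1) (List.replicate (m+1) (-(10^9))))) (K+1) 0
          (go + ((K:Int)+1-1) * ge) := by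
      rw [show ((K:Int)+1) = (((K+1:Nat)):Int) by push_cast; ring,
          show (0:Int) = (((0:Nat)):Int) by norm_num]
      exact pvSet2_natCast _ _ _ _
    rw [hset]
    refine ⟨pvDims_pvS n m _ _ _ _ ih.1 (by omega), fun p q hp hq => ?_⟩
    rw [pvG_pvS _ _ _ _ _ _ (by have := ih.1.1; omega) (by have := ih.1.2 (K+1) (by omega); omega), ih.2 p q hp hq]
    by_cases h1 : p = K + 1 ∧ q = 0
    · obtain ⟨rfl, rfl⟩ := h1
      rw [if_pos ⟨rfl, rfl⟩, if_pos (by omega)]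
      push_cast
      ring
    · rw [if_neg h1]
      split_ifs with h2 h3 h3 <;> first | rfl | (exfalso; omega)

theorem pvIy_init (go ge : Int) (n m : Nat) (K : Nat) (hK : K ≤ m) :
    pvDims n m ((PySem.List.pyRange 1 ((K:Int)+1) 1).foldl
        (fun Iy j => pvSet2 Iy 0 j (go + (j-1) * ge))
        (List.replicate (n+1) (List.replicate (m+1) (-(10^9))))) ∧
    ∀ p q, p ≤ n → q ≤ m →
      pvG ((PySem.List.pyRange 1 ((K:Int)+1) 1).foldl
        (fun Iy j => pvSet2 Iy 0 j (go + (j-1) * ge))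
        (List.replicate (n+1) (List.replicate (m+1) (-(10^9))))) p q
      = if p = 0 ∧ 1 ≤ q ∧ q ≤ K then go + ((q:Int)-1) * ge else -(10^9) := by
  induction K with
  | zero =>
    rw [PySem.List.pyRange_one_eq_nil (by norm_num)]
    refine ⟨pvDims_replicate n m _, fun p q hp hq => ?_⟩
    simp only [List.foldl_nil]
    rw [pvG_replicate n m _ p q hp hq, if_neg (by omega)]
  | succ K ih =>
    have ih := ih (by omega)
    have hcast : (((K+1 : Nat)):Int) + 1 = (((K:Nat)):Int) + 1 + 1 := by push_cast; ring
    rw [hcast, PySem.List.pyRange_one_succ_right (by omega), List.foldl_append]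
    simp only [List.foldl_cons, List.foldl_nil]
    have hset : pvSet2 ((PySem.List.pyRange 1 ((K:Int)+1) 1).foldl
        (fun Iy j => pvSet2 Iy 0 j (go + (j-1) * ge))
        (List.replicate (n+1) (List.replicate (m+1) (-(10^9))))) 0 ((K:Int)+1)
          (go + ((K:Int)+1-1) * ge)
        = pvS ((PySem.List.pyRange 1 ((K:Int)+1) 1).foldl
        (fun Iy j => pvSet2 Iy 0 j (go + (j-1) * ge))
        (List.replicate (n+1) (List.replicate (m+1) (-(10^9))))) 0 (K+1)
          (go + ((K:Int)+1-1) * ge) := by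
      rw [show ((K:Int)+1) = (((K+1:Nat)):Int) by push_cast; ring,
          show (0:Int) = (((0:Nat)):Int) by norm_num]
      exact pvSet2_natCast _ _ _ _
    rw [hset]
    refine ⟨pvDims_pvS n m _ _ _ _ ih.1 (by omega), fun p q hp hq => ?_⟩
    rw [pvG_pvS _ _ _ _ _ _ (by have := ih.1.1; omega) (by have := ih.1.2 0 (by omega); omega), ih.2 p q hp hq]
    by_cases h1 : p = 0 ∧ q = K + 1
    · obtain ⟨rfl, rfl⟩ := h1
      rw [if_pos ⟨rfl, rfl⟩, if_pos (by omega)]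
      push_cast
      ring
    · rw [if_neg h1]
      split_ifs with h2 h3 h3 <;> first | rfl | (exfalso; omega)

theorem pvTbl_Ix_init (al bl : List Char) (mt ms go ge : Int) (n m : Nat) :
    pvTbl (nwaF al bl mt ms go ge) (·.2.1) n m 0 0
      ((PySem.List.pyRange 1 ((n:Int)+1) 1).foldl
        (fun Ix i => pvSet2 Ix i 0 (go + (i-1) * ge))
        (List.replicate (n+1) (List.replicate (m+1) (-(10^9))))) := by
  obtain ⟨hd, hv⟩ := pvIx_init go ge n m n le_rfl
  refine ⟨hd, fun p q hp hq => ?_⟩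
  rw [hv p q hp hq]
  rcases q with _ | q'
  · rcases p with _ | p'
    · simp [pvDone, nwaF]
    · rw [if_pos ⟨by omega, by omega, rfl⟩]
      simp [pvDone, nwaF]
  · rw [if_neg (by omega)]
    rcases p with _ | p'
    · simp [pvDone, nwaF]
    · simp [pvDone]

theorem pvTbl_Iy_init (al bl : List Char) (mt ms go ge : Int) (n m : Nat) :
    pvTbl (nwaF al bl mt ms go ge) (·.2.2) n m 0 0
      ((PySem.List.pyRange 1 ((m:Int)+1) 1).foldl
        (fun Iy j => pvSet2 Iy 0 j (go + (j-1) * ge))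
        (List.replicate (n+1) (List.replicate (m+1) (-(10^9))))) := by
  obtain ⟨hd, hv⟩ := pvIy_init go ge n m m le_rfl
  refine ⟨hd, fun p q hp hq => ?_⟩
  rw [hv p q hp hq]
  rcases p with _ | p'
  · rcases q with _ | q'
    · simp [pvDone, nwaF]
    · rw [if_pos ⟨rfl, by omega, by omega⟩]
      simp [pvDone, nwaF]
  · rw [if_neg (by omega)]
    rcases q with _ | q'
    · simp [pvDone, nwaF]
    · simp [pvDone]

theorem pvDone_succJ (I J p q : Nat) (h : ¬(p = I + 1 ∧ q = J + 1)) :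
    pvDone I (J+1) p q = pvDone I J p q := by
  rw [Bool.eq_iff_iff]
  simp only [pvDone, Bool.or_eq_true, Bool.and_eq_true, beq_iff_eq, decide_eq_true_eq]
  omega

theorem pvDone_true (I J p q : Nat)
    (h : p = 0 ∨ q = 0 ∨ p ≤ I ∨ (p = I + 1 ∧ q ≤ J)) :
    pvDone I J p q = true := by
  simp only [pvDone, Bool.or_eq_true, Bool.and_eq_true, beq_iff_eq, decide_eq_true_eq]
  omega

theorem pvInner_step (a b : String) (mt ms go ge : Int) (I J : Nat)
    (hI : I + 1 ≤ a.toList.length) (hJ : J + 1 ≤ b.toList.length)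
    (st : List (List Int) × List (List Int) × List (List Int))
    (h : pvInv a.toList b.toList mt ms go ge I J st) :
    pvInv a.toList b.toList mt ms go ge I (J+1)
      (pvInnerA a b mt ms go ge (((I+1:Nat)):Int) st (((J+1:Nat)):Int)) := by
  obtain ⟨hM, hIx, hIy⟩ := h
  have hiA : (((I+1:Nat)):Int) - 1 = ((I:Nat):Int) := by push_cast; ring
  have hjA : (((J+1:Nat)):Int) - 1 = ((J:Nat):Int) := by push_cast; ring
  have hdM : pvG st.1 I J = (nwaF a.toList b.toList mt ms go ge I J).1 := by
    rw [hM.2 I J (by omega) (by omega), if_pos (pvDone_true I J I J (by omega))]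
  have hdIx : pvG st.2.1 I J = (nwaF a.toList b.toList mt ms go ge I J).2.1 := by
    rw [hIx.2 I J (by omega) (by omega), if_pos (pvDone_true I J I J (by omega))]
  have hdIy : pvG st.2.2 I J = (nwaF a.toList b.toList mt ms go ge I J).2.2 := by
    rw [hIy.2 I J (by omega) (by omega), if_pos (pvDone_true I J I J (by omega))]
  have huIx : pvG st.2.1 I (J+1) = (nwaF a.toList b.toList mt ms go ge I (J+1)).2.1 := by
    rw [hIx.2 I (J+1) (by omega) (by omega), if_pos (pvDone_true I J I (J+1) (by omega))]
  have hlIy : pvG st.2.2 (I+1) J = (nwaF a.toList b.toList mt ms go ge (I+1) J).2.2 := by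
    rw [hIy.2 (I+1) J (by omega) (by omega), if_pos (pvDone_true I J (I+1) J (by omega))]
  have hv1 : max (max (nwaF a.toList b.toList mt ms go ge I J).1
        (nwaF a.toList b.toList mt ms go ge I J).2.1)
        (nwaF a.toList b.toList mt ms go ge I J).2.2
        + (if a.toList[I]? == b.toList[J]? then mt else ms)
      = (nwaF a.toList b.toList mt ms go ge (I+1) (J+1)).1 := by
    conv_rhs => rw [nwaF]
  -- reads from the updated M table
  have hT1u : pvG (pvS st.1 (I+1) (J+1)
        ((nwaF a.toList b.toList mt ms go ge (I+1) (J+1)).1)) I (J+1)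
      = (nwaF a.toList b.toList mt ms go ge I (J+1)).1 := by
    rw [pvG_pvS _ _ _ _ _ _ (by have := hM.1.1; omega) (by have := hM.1.2 (I+1) (by omega); omega),
        if_neg (by omega), hM.2 I (J+1) (by omega) (by omega),
        if_pos (pvDone_true I J I (J+1) (by omega))]
  have hT1l : pvG (pvS st.1 (I+1) (J+1)
        ((nwaF a.toList b.toList mt ms go ge (I+1) (J+1)).1)) (I+1) J
      = (nwaF a.toList b.toList mt ms go ge (I+1) J).1 := by
    rw [pvG_pvS _ _ _ _ _ _ (by have := hM.1.1; omega) (by have := hM.1.2 (I+1) (by omega); omega),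
        if_neg (by omega), hM.2 (I+1) J (by omega) (by omega),
        if_pos (pvDone_true I J (I+1) J (by omega))]
  have hv2 : max ((nwaF a.toList b.toList mt ms go ge I (J+1)).1 + go)
        ((nwaF a.toList b.toList mt ms go ge I (J+1)).2.1 + ge)
      = (nwaF a.toList b.toList mt ms go ge (I+1) (J+1)).2.1 := by
    conv_rhs => rw [nwaF]
  have hv3 : max ((nwaF a.toList b.toList mt ms go ge (I+1) J).1 + go)
        ((nwaF a.toList b.toList mt ms go ge (I+1) J).2.2 + ge)
      = (nwaF a.toList b.toList mt ms go ge (I+1) (J+1)).2.2 := by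
    conv_rhs => rw [nwaF]
  have hstep : pvInnerA a b mt ms go ge (((I+1:Nat)):Int) st (((J+1:Nat)):Int)
      = (pvS st.1 (I+1) (J+1) ((nwaF a.toList b.toList mt ms go ge (I+1) (J+1)).1),
         pvS st.2.1 (I+1) (J+1) ((nwaF a.toList b.toList mt ms go ge (I+1) (J+1)).2.1),
         pvS st.2.2 (I+1) (J+1) ((nwaF a.toList b.toList mt ms go ge (I+1) (J+1)).2.2)) := by
    simp only [pvInnerA, hiA, hjA, pvGet2_natCast, pvSet2_natCast, PySem.Str.pyGet?_natCast]
    rw [hdM, hdIx, hdIy, hv1, hT1u, huIx, hv2, hT1l, hlIy, hv3]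
  rw [hstep]
  refine ⟨⟨pvDims_pvS _ _ _ _ _ _ hM.1 (by omega), fun p q hp hq => ?_⟩,
          ⟨pvDims_pvS _ _ _ _ _ _ hIx.1 (by omega), fun p q hp hq => ?_⟩,
          ⟨pvDims_pvS _ _ _ _ _ _ hIy.1 (by omega), fun p q hp hq => ?_⟩⟩
  · rw [pvG_pvS _ _ _ _ _ _ (by have := hM.1.1; omega) (by have := hM.1.2 (I+1) (by omega); omega)]
    by_cases hpq : p = I + 1 ∧ q = J + 1
    · obtain ⟨rfl, rfl⟩ := hpq
      rw [if_pos ⟨rfl, rfl⟩, if_pos (pvDone_true I (J+1) (I+1) (J+1) (by omega))]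
    · rw [if_neg hpq, hM.2 p q hp hq, pvDone_succJ I J p q hpq]
  · rw [pvG_pvS _ _ _ _ _ _ (by have := hIx.1.1; omega) (by have := hIx.1.2 (I+1) (by omega); omega)]
    by_cases hpq : p = I + 1 ∧ q = J + 1
    · obtain ⟨rfl, rfl⟩ := hpq
      rw [if_pos ⟨rfl, rfl⟩, if_pos (pvDone_true I (J+1) (I+1) (J+1) (by omega))]
    · rw [if_neg hpq, hIx.2 p q hp hq, pvDone_succJ I J p q hpq]
  · rw [pvG_pvS _ _ _ _ _ _ (by have := hIy.1.1; omega) (by have := hIy.1.2 (I+1) (by omega); omega)]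
    by_cases hpq : p = I + 1 ∧ q = J + 1
    · obtain ⟨rfl, rfl⟩ := hpq
      rw [if_pos ⟨rfl, rfl⟩, if_pos (pvDone_true I (J+1) (I+1) (J+1) (by omega))]
    · rw [if_neg hpq, hIy.2 p q hp hq, pvDone_succJ I J p q hpq]

theorem pvTbl_shift (F : Nat → Nat → Int × Int × Int) (sel : Int × Int × Int → Int)
    (n m I : Nat) (t : List (List Int)) (h : pvTbl F sel n m I m t) :
    pvTbl F sel n m (I+1) 0 t := by
  refine ⟨h.1, fun p q hp hq => ?_⟩
  rw [h.2 p q hp hq]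
  have hcond : pvDone I m p q = pvDone (I+1) 0 p q := by
    rw [Bool.eq_iff_iff]
    simp only [pvDone, Bool.or_eq_true, Bool.and_eq_true, beq_iff_eq, decide_eq_true_eq]
    omega
  rw [hcond]

theorem pvInv_shift (al bl : List Char) (mt ms go ge : Int) (I : Nat)
    (st : List (List Int) × List (List Int) × List (List Int))
    (h : pvInv al bl mt ms go ge I bl.length st) :
    pvInv al bl mt ms go ge (I+1) 0 st :=
  ⟨pvTbl_shift _ _ _ _ _ _ h.1, pvTbl_shift _ _ _ _ _ _ h.2.1, pvTbl_shift _ _ _ _ _ _ h.2.2⟩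

theorem pvInner_fold (a b : String) (mt ms go ge : Int) (I : Nat)
    (hI : I + 1 ≤ a.toList.length) (K : Nat) (hK : K ≤ b.toList.length)
    (st : List (List Int) × List (List Int) × List (List Int))
    (h : pvInv a.toList b.toList mt ms go ge I 0 st) :
    pvInv a.toList b.toList mt ms go ge I K
      ((PySem.List.pyRange 1 ((K:Int)+1) 1).foldl
        (pvInnerA a b mt ms go ge (((I+1:Nat)):Int)) st) := by
  induction K with
  | zero =>
    rw [PySem.List.pyRange_one_eq_nil (by norm_num)]
    simpa using h
  | succ K ih =>
    rw [show (((K+1:Nat)):Int) + 1 = ((K:Int)+1) + 1 by push_cast; ring,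
        PySem.List.pyRange_one_succ_right (by omega), List.foldl_append,
        show [((K:Int)+1)] = [(((K+1:Nat)):Int)] by norm_num]
    simp only [List.foldl_cons, List.foldl_nil]
    exact pvInner_step a b mt ms go ge I K hI (by omega) _ (ih (by omega))

theorem pvOuter_step (a b : String) (mt ms go ge : Int) (I : Nat)
    (hI : I + 1 ≤ a.toList.length)
    (st : List (List Int) × List (List Int) × List (List Int))
    (h : pvInv a.toList b.toList mt ms go ge I 0 st) :
    pvInv a.toList b.toList mt ms go ge (I+1) 0
      (pvOuterA a b mt ms go ge st (((I+1:Nat)):Int)) := by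
  unfold pvOuterA
  rw [show PySem.Str.len b = ((b.toList.length : Nat) : Int) by simp]
  exact pvInv_shift _ _ _ _ _ _ _ _
    (pvInner_fold a b mt ms go ge I hI b.toList.length le_rfl st h)

theorem pvOuter_fold (a b : String) (mt ms go ge : Int) (K : Nat)
    (hK : K ≤ a.toList.length)
    (st : List (List Int) × List (List Int) × List (List Int))
    (h : pvInv a.toList b.toList mt ms go ge 0 0 st) :
    pvInv a.toList b.toList mt ms go ge K 0
      ((PySem.List.pyRange 1 ((K:Int)+1) 1).foldl (pvOuterA a b mt ms go ge) st) := by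
  induction K with
  | zero =>
    rw [PySem.List.pyRange_one_eq_nil (by norm_num)]
    simpa using h
  | succ K ih =>
    rw [show (((K+1:Nat)):Int) + 1 = ((K:Int)+1) + 1 by push_cast; ring,
        PySem.List.pyRange_one_succ_right (by omega), List.foldl_append,
        show [((K:Int)+1)] = [(((K+1:Nat)):Int)] by norm_num]
    simp only [List.foldl_cons, List.foldl_nil]
    exact pvOuter_step a b mt ms go ge K (by omega) _ (ih (by omega))

-- A's result is the recurrence value at (n, m)
theorem pvA_eq (a b : String) (mt ms go ge : Int) :
    needleman_wunsch_affine a b mt ms go ge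
      = max (max ((nwaF a.toList b.toList mt ms go ge a.toList.length b.toList.length).1)
          ((nwaF a.toList b.toList mt ms go ge a.toList.length b.toList.length).2.1))
          ((nwaF a.toList b.toList mt ms go ge a.toList.length b.toList.length).2.2) := by
  unfold needleman_wunsch_affine
  rw [show PySem.Str.len a = ((a.toList.length : Nat) : Int) by simp,
      show PySem.Str.len b = ((b.toList.length : Nat) : Int) by simp]
  simp only [pvInitTbl]
  rw [show (pvSet2 (List.replicate (a.toList.length+1)
        (List.replicate (b.toList.length+1) (-(10^9)))) 0 0 0)
      = pvS (List.replicate (a.toList.length+1)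
        (List.replicate (b.toList.length+1) (-(10^9)))) 0 0 0 by
    rw [show (0:Int) = (((0:Nat)):Int) by norm_num]
    exact pvSet2_natCast _ _ _ _]
  have hinv : pvInv a.toList b.toList mt ms go ge a.toList.length 0
      ((PySem.List.pyRange 1 ((a.toList.length:Int)+1) 1).foldl
        (pvOuterA a b mt ms go ge)
        (pvS (List.replicate (a.toList.length+1)
            (List.replicate (b.toList.length+1) (-(10^9)))) 0 0 0,
         (PySem.List.pyRange 1 ((a.toList.length:Int)+1) 1).foldl
            (fun Ix i => pvSet2 Ix i 0 (go + (i-1) * ge))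
            (List.replicate (a.toList.length+1) (List.replicate (b.toList.length+1) (-(10^9)))),
         (PySem.List.pyRange 1 ((b.toList.length:Int)+1) 1).foldl
            (fun Iy j => pvSet2 Iy 0 j (go + (j-1) * ge))
            (List.replicate (a.toList.length+1) (List.replicate (b.toList.length+1) (-(10^9)))))) :=
    pvOuter_fold a b mt ms go ge a.toList.length le_rfl _
      ⟨pvTbl_M_init a.toList b.toList mt ms go ge _ _,
       pvTbl_Ix_init a.toList b.toList mt ms go ge _ _,
       pvTbl_Iy_init a.toList b.toList mt ms go ge _ _⟩
  obtain ⟨hM, hIx, hIy⟩ := hinv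
  rw [pvGet2_natCast, pvGet2_natCast, pvGet2_natCast,
      hM.2 _ _ le_rfl le_rfl, hIx.2 _ _ le_rfl le_rfl, hIy.2 _ _ le_rfl le_rfl,
      if_pos (pvDone_true _ _ _ _ (by omega)), if_pos (pvDone_true _ _ _ _ (by omega)),
      if_pos (pvDone_true _ _ _ _ (by omega))]

-- B's result is the recurrence value at (n, m)
theorem pvB_eq (a b : String) (mt ms go ge : Int) :
    needleman_wunsch_affine_alt a b mt ms go ge
      = max (max ((nwaF a.toList b.toList mt ms go ge a.toList.length b.toList.length).1)
          ((nwaF a.toList b.toList mt ms go ge a.toList.length b.toList.length).2.1))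
          ((nwaF a.toList b.toList mt ms go ge a.toList.length b.toList.length).2.2) := by
  unfold needleman_wunsch_affine_alt
  have hempty : nwaMemoOk a.toList b.toList mt ms go ge (PySem.Dict.empty) := by
    intro k v hk
    simp at hk
  have hgo := (nwaGo_spec a.toList b.toList mt ms go ge
    (a.toList.length + b.toList.length) a.toList.length b.toList.length le_rfl
    PySem.Dict.empty hempty).1
  show max (max (nwaGo a.toList b.toList mt ms go ge a.toList.length b.toList.length PySem.Dict.empty).1.1
      (nwaGo a.toList b.toList mt ms go ge a.toList.length b.toList.length PySem.Dict.empty).1.2.1)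
      (nwaGo a.toList b.toList mt ms go ge a.toList.length b.toList.length PySem.Dict.empty).1.2.2 = _
  rw [hgo]

-- ===== VERDICT (by name: the statement is the Claim_ definition above) =====
theorem needleman_wunsch_affine_spec : Claim_equal_needleman_wunsch_affine := by
  intro a b match_ mismatch gap_open gap_extend _
  unfold Spec_needleman_wunsch_affine
  rw [pvA_eq, pvB_eq]
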